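-- pv_equiv track=rewrite | github.com/adambornemann-glitch/LogosLibrary | lean_stats.py | strip_block_comments
-- ===== SOURCE A (Python) =====
-- from typing import List, Dict, Tuple
--
-- def strip_block_comments(source: str) -> Tuple[str, int]:
--     """Remove all /- ... -/ block comments, respecting nesting.
--     Returns (stripped_source, number_of_lines_touched_by_block_comments)."""
--     result = []
--     i = 0
--     depth = 0
--     n = len(source)
--     # Track which lines have any content inside a block comment
--     current_line = 0
--     lines_in_comments: set = set()
--     while i < n:
--         if i + 1 < n and source[i] == "/" and source[i + 1] == "-":
--             depth += 1
--             lines_in_comments.add(current_line)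
--             i += 2
--         elif i + 1 < n and source[i] == "-" and source[i + 1] == "/" and depth > 0:
--             depth -= 1
--             lines_in_comments.add(current_line)
--             i += 2
--         elif depth == 0:
--             if source[i] == "\n":
--                 current_line += 1
--             result.append(source[i])
--             i += 1
--         else:
--             # Inside a block comment
--             lines_in_comments.add(current_line)
--             if source[i] == "\n":
--                 current_line += 1
--             i += 1
--     return "".join(result), len(lines_in_comments)
-- ===== SOURCE B (Python) =====
-- def strip_block_comments(source):
--     """Remove all /- ... -/ block comments, respecting nesting.
--     Returns (stripped_source, number_of_lines_touched_by_block_comments)."""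
--     parts = []
--     depth = 0
--     touched = 0
--     lines = source.split("\n")
--     last = len(lines) - 1
--     for k, line in enumerate(lines):
--         kept, depth, t = _scan_line(line, depth)
--         parts.append(kept)
--         if k < last:
--             if depth == 0:
--                 parts.append("\n")
--             else:
--                 t = True  # the dropped newline itself lies inside a comment
--         if t:
--             touched += 1
--     return "".join(parts), touched
--
--
-- def _scan_line(line, depth):
--     """Scan one newline-free line; return (kept_text, final_depth, touched)."""
--     kept = []
--     touched = False
--     i, m = 0, len(line)
--     while i < m:
--         two = line[i:i + 2]
--         if two == "/-":
--             depth += 1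
--             touched = True
--             i += 2
--         elif two == "-/" and depth > 0:
--             depth -= 1
--             touched = True
--             i += 2
--         elif depth == 0:
--             kept.append(line[i])
--             i += 1
--         else:
--             touched = True
--             i += 1
--     return "".join(kept), depth, touched
-- ===== Notes on version B (the rewrite author's own statement) =====
-- stated objective: alternative
-- what changed: A makes one character-by-character pass over the whole source while tracking a current-line counter and a set of touched line numbers; B instead splits the source into its lines, scans each line separately threading the nesting depth through, records a single touched flag per line, counts touched lines with a plain counter, and re-joins the kept line texts with a line break only where the depth between two lines is zero.
import Mathlib
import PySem

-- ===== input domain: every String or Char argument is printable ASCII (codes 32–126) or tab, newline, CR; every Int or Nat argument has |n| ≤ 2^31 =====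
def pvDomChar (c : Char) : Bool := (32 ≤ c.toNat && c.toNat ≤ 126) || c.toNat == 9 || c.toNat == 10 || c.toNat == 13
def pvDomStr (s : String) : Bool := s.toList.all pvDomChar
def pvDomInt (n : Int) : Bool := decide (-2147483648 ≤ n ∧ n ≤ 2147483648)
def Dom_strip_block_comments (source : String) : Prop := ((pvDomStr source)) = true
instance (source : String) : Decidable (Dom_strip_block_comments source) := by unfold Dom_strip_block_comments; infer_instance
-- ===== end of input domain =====

-- B replaces A's single whole-string scan (line counter + set of touched line numbers) by a split('\n'),
-- a per-line scan threading the nesting depth, a per-line touched flag, and a conditional-newline join ("alternative").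

-- ===== PORT A =====
-- A's while loop over the whole source: state (depth, current_line, lines_in_comments); output built front-to-back.
def stripGoA : List Char → Int → Int → PySem.Set Int → List Char × PySem.Set Int
  | c1 :: c2 :: rest, d, cl, s =>
    if c1 = '/' ∧ c2 = '-' then stripGoA rest (d + 1) cl (PySem.Set.add s cl)
    else if c1 = '-' ∧ c2 = '/' ∧ 0 < d then stripGoA rest (d - 1) cl (PySem.Set.add s cl)
    else if d = 0 then
      let r := stripGoA (c2 :: rest) d (if c1 = '\n' then cl + 1 else cl) s
      (c1 :: r.1, r.2)
    else stripGoA (c2 :: rest) d (if c1 = '\n' then cl + 1 else cl) (PySem.Set.add s cl)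
  | [c1], d, cl, s =>
    -- i + 1 < n fails on the last character: only A's last two branches are reachable
    if d = 0 then ([c1], s) else (([] : List Char), PySem.Set.add s cl)
  | [], _, _, s => (([] : List Char), s)
termination_by cs => cs.length

def strip_block_comments (source : String) : String × Int :=
  let r := stripGoA source.toList 0 0 PySem.Set.empty
  (String.ofList r.1, PySem.Set.len r.2)

-- ===== PORT B =====
-- B's _scan_line on one newline-free line: returns (kept, final depth, touched); line[i:i+2] = the two-char patterns.
def scanLineB : List Char → Int → List Char × Int × Bool
  | c1 :: c2 :: rest, d =>
    if c1 = '/' ∧ c2 = '-' then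
      let r := scanLineB rest (d + 1); (r.1, r.2.1, true)
    else if c1 = '-' ∧ c2 = '/' ∧ 0 < d then
      let r := scanLineB rest (d - 1); (r.1, r.2.1, true)
    else if d = 0 then
      let r := scanLineB (c2 :: rest) d; (c1 :: r.1, r.2.1, r.2.2)
    else
      let r := scanLineB (c2 :: rest) d; (r.1, r.2.1, true)
  | [c1], d => if d = 0 then ([c1], d, false) else (([] : List Char), d, true)
  | [], d => (([] : List Char), d, false)
termination_by cs => cs.length

-- B's main loop over the split lines ('k < last' ↔ the line is not the final one).
def stripGoB : List (List Char) → Int → List Char × Int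
  | [], _ => (([] : List Char), 0)
  | [line], d =>
    let r := scanLineB line d
    (r.1, if r.2.2 then 1 else 0)
  | line :: l2 :: rest, d =>
    let r := scanLineB line d
    let g := stripGoB (l2 :: rest) r.2.1
    if r.2.1 = 0 then (r.1 ++ '\n' :: g.1, (if r.2.2 then 1 else 0) + g.2)
    else (r.1 ++ g.1, 1 + g.2)

def strip_block_comments_alt (source : String) : String × Int :=
  let r := stripGoB (PySem.Chars.splitOn source.toList ['\n']) 0
  (String.ofList r.1, r.2)

-- ===== PRECONDITION & SPEC =====
def Spec_strip_block_comments (source : String) (out : String × Int) : Prop := out = strip_block_comments_alt source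
instance (source : String) (out : String × Int) : Decidable (Spec_strip_block_comments source out) := by unfold Spec_strip_block_comments; infer_instance

-- ===== CLAIM (what is proved, stated in full; the proofs are below) =====
def Claim_equal_strip_block_comments : Prop := ∀ (source : String), Dom_strip_block_comments source → Spec_strip_block_comments source (strip_block_comments source)

-- ===== LEMMAS AND PROOFS =====

-- the lines of a char list, split at '\n' (specification of PySem.Chars.splitOn for this separator)
def linesOf : List Char → List (List Char)
  | [] => [[]]
  | c :: r =>
    if c = '\n' then [] :: linesOf r
    else
      match linesOf r with
      | l :: ls => (c :: l) :: ls
      | [] => [[c]]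

def joinNL : List (List Char) → List Char
  | [] => []
  | [l] => l
  | l :: ls => l ++ '\n' :: joinNL ls

-- the set after scanning one line at line number cl: touched lines add cl
def setAfter (line : List Char) (d cl : Int) (s : PySem.Set Int) : PySem.Set Int :=
  if (scanLineB line d).2.2 then PySem.Set.add s cl else s

theorem linesOf_ne_nil (cs : List Char) : linesOf cs ≠ [] := by
  induction cs with
  | nil => simp [linesOf]
  | cons c r ih =>
    simp only [linesOf]
    split
    · simp
    · cases h : linesOf r <;> simp

theorem no_nl_linesOf (cs : List Char) : ∀ l ∈ linesOf cs, '\n' ∉ l := by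
  induction cs with
  | nil => simp [linesOf]
  | cons c r ih =>
    simp only [linesOf]
    split
    · intro l hl
      rw [List.mem_cons] at hl
      rcases hl with h | h
      · simp [h]
      · exact ih l h
    · rename_i hc
      cases h : linesOf r with
      | nil =>
        intro l hl; simp at hl; subst hl
        simp only [List.mem_singleton]
        exact fun hh => hc hh.symm
      | cons l0 ls =>
        intro l hl
        rw [List.mem_cons] at hl
        rcases hl with h1 | h1
        · subst h1
          have := ih l0 (by rw [h]; simp)
          simp [this]
          exact fun hh => hc hh.symm
        · exact ih l (by rw [h]; simp [h1])

theorem joinNL_linesOf (cs : List Char) : joinNL (linesOf cs) = cs := by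
  induction cs with
  | nil => simp [linesOf, joinNL]
  | cons c r ih =>
    simp only [linesOf]
    split
    · rename_i hc
      subst hc
      cases h : linesOf r with
      | nil => exact absurd h (linesOf_ne_nil r)
      | cons l0 ls => rw [h] at ih; simpa [joinNL] using ih
    · cases h : linesOf r with
      | nil => exact absurd h (linesOf_ne_nil r)
      | cons l0 ls =>
        rw [h] at ih
        cases ls with
        | nil => simpa [joinNL] using ih
        | cons l1 ls' => simp only [joinNL] at ih ⊢; simp [ih]

theorem splitOn_go_nl : ∀ (l : List Char) (fuel : Nat) (cur : List Char) (acc : List (List Char)),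
    l.length < fuel →
    PySem.Chars.splitOn.go ['\n'] fuel l cur acc =
      acc.reverse ++ (match linesOf l with
        | x :: xs => (cur.reverse ++ x) :: xs
        | [] => []) := by
  intro l
  induction l with
  | nil =>
    intro fuel cur acc hf
    cases fuel with
    | zero => omega
    | succ f => simp [PySem.Chars.splitOn.go, linesOf]
  | cons c rest ih =>
    intro fuel cur acc hf
    cases fuel with
    | zero => omega
    | succ f =>
      by_cases hc : c = '\n'
      · subst hc
        rw [PySem.Chars.splitOn.go]
        have hp : List.isPrefixOf ['\n'] ('\n' :: rest) = true := by simp [List.isPrefixOf]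
        rw [if_pos hp]
        simp only [List.length_singleton, List.drop_one, List.tail_cons]
        rw [ih f [] (cur.reverse :: acc) (by simp at hf; omega)]
        cases hl : linesOf rest with
        | nil => exact absurd hl (linesOf_ne_nil rest)
        | cons x xs => simp [linesOf, hl]
      · rw [PySem.Chars.splitOn.go]
        have hp : List.isPrefixOf ['\n'] (c :: rest) = false := by
          simp [List.isPrefixOf]
          exact fun hh => hc hh.symm
        rw [if_neg (by simp [hp])]
        rw [ih f (c :: cur) acc (by simp at hf; omega)]
        cases hl : linesOf rest with
        | nil => exact absurd hl (linesOf_ne_nil rest)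
        | cons x xs => simp [linesOf, hl, hc]

theorem splitOn_nl (cs : List Char) :
    PySem.Chars.splitOn cs ['\n'] = linesOf cs := by
  have h := splitOn_go_nl cs (cs.length + 1) [] [] (by omega)
  unfold PySem.Chars.splitOn
  rw [h]
  cases hl : linesOf cs with
  | nil => exact absurd hl (linesOf_ne_nil cs)
  | cons x xs => simp

theorem set_add_idem (s : PySem.Set Int) (x : Int) :
    PySem.Set.add (PySem.Set.add s x) x = PySem.Set.add s x := by
  by_cases h : x ∈ s
  · simp [PySem.Set.add, PySem.Set.contains, h]
  · simp [PySem.Set.add, PySem.Set.contains, h]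

theorem set_len_add_not_mem (s : PySem.Set Int) (x : Int) (h : x ∉ s) :
    PySem.Set.len (PySem.Set.add s x) = PySem.Set.len s + 1 := by
  simp [PySem.Set.add, PySem.Set.contains, PySem.Set.len, h]

theorem setAfter_add (line : List Char) (d cl : Int) (s : PySem.Set Int) :
    setAfter line d cl (PySem.Set.add s cl) = PySem.Set.add s cl := by
  unfold setAfter
  split <;> simp

theorem scan_last : ∀ (line : List Char) (d : Int), '\n' ∉ line →
    ∀ (cl : Int) (s : PySem.Set Int),
    stripGoA line d cl s = ((scanLineB line d).1, setAfter line d cl s) := by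
  intro line d
  induction line, d using scanLineB.induct with
  | case1 c1 c2 rest d hc ih =>
    intro h cl s
    have hr : '\n' ∉ rest := by simp at h; tauto
    rw [stripGoA, if_pos hc, ih hr, setAfter_add]
    simp [setAfter, scanLineB, hc]
  | case2 c1 c2 rest d h1 hc ih =>
    intro h cl s
    have hr : '\n' ∉ rest := by simp at h; tauto
    rw [stripGoA, if_neg h1, if_pos hc, ih hr, setAfter_add]
    simp [setAfter, scanLineB, hc]
  | case3 c1 c2 rest h1 h2 ih =>
    intro h cl s
    have hr : '\n' ∉ c2 :: rest := by simp at h ⊢; tauto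
    have hc1 : ¬ c1 = '\n' := by simp at h; tauto
    rw [stripGoA, if_neg h1, if_neg h2, if_pos rfl]
    simp only [ih hr, if_neg hc1]
    simp [setAfter, scanLineB, h1]
  | case4 c1 c2 rest d h1 h2 hd ih =>
    intro h cl s
    have hr : '\n' ∉ c2 :: rest := by simp at h ⊢; tauto
    have hc1 : ¬ c1 = '\n' := by simp at h; tauto
    rw [stripGoA, if_neg h1, if_neg h2, if_neg hd]
    simp only [if_neg hc1]
    rw [ih hr, setAfter_add]
    simp [setAfter, scanLineB, h1, h2, hd]
  | case5 c1 => intro h cl s; rw [stripGoA, scanLineB]; simp [setAfter, scanLineB]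
  | case6 c1 d hd =>
    intro h cl s
    rw [stripGoA, if_neg hd, scanLineB]
    simp [setAfter, scanLineB, hd]
  | case7 d => intro h cl s; rw [stripGoA, scanLineB]; simp [setAfter, scanLineB]

theorem goA_nl (rest : List Char) (d cl : Int) (s : PySem.Set Int) :
    stripGoA ('\n' :: rest) d cl s =
      if d = 0 then
        ('\n' :: (stripGoA rest 0 (cl + 1) s).1, (stripGoA rest 0 (cl + 1) s).2)
      else stripGoA rest d (cl + 1) (PySem.Set.add s cl) := by
  cases rest with
  | nil =>
    rw [stripGoA]
    split
    · rename_i hd; subst hd; rw [stripGoA]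
    · rw [stripGoA]
  | cons c rs =>
    rw [stripGoA]
    have h1 : ¬('\n' = '/' ∧ c = '-') := by simp
    have h2 : ¬('\n' = '-' ∧ c = '/' ∧ 0 < d) := by simp
    rw [if_neg h1, if_neg h2]
    split
    · rename_i hd; subst hd; simp
    · simp

theorem scan_mid : ∀ (line : List Char) (d : Int), '\n' ∉ line →
    ∀ (rest : List Char) (cl : Int) (s : PySem.Set Int),
    stripGoA (line ++ '\n' :: rest) d cl s =
      if (scanLineB line d).2.1 = 0 then
        ((scanLineB line d).1 ++ '\n' :: (stripGoA rest 0 (cl + 1) (setAfter line d cl s)).1,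
         (stripGoA rest 0 (cl + 1) (setAfter line d cl s)).2)
      else
        ((scanLineB line d).1 ++
           (stripGoA rest (scanLineB line d).2.1 (cl + 1)
             (PySem.Set.add (setAfter line d cl s) cl)).1,
         (stripGoA rest (scanLineB line d).2.1 (cl + 1)
           (PySem.Set.add (setAfter line d cl s) cl)).2) := by
  intro line d
  induction line, d using scanLineB.induct with
  | case1 c1 c2 ls d hc ih =>
    intro h rest cl s
    have hr : '\n' ∉ ls := by simp at h; tauto
    rw [List.cons_append, List.cons_append, stripGoA, if_pos hc, ih hr, setAfter_add]
    simp [setAfter, scanLineB, hc]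
  | case2 c1 c2 ls d h1 hc ih =>
    intro h rest cl s
    have hr : '\n' ∉ ls := by simp at h; tauto
    rw [List.cons_append, List.cons_append, stripGoA, if_neg h1, if_pos hc, ih hr, setAfter_add]
    simp [setAfter, scanLineB, hc]
  | case3 c1 c2 ls h1 h2 ih =>
    intro h rest cl s
    have hr : '\n' ∉ c2 :: ls := by simp at h ⊢; tauto
    have hc1 : ¬ c1 = '\n' := by simp at h; tauto
    simp only [List.cons_append] at ih ⊢
    rw [stripGoA, if_neg h1, if_neg h2, if_pos rfl]
    simp only [ih hr, if_neg hc1]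
    simp only [setAfter, scanLineB, if_neg h1, if_neg h2]
    split <;> rename_i hx <;> simp [hx]
  | case4 c1 c2 ls d h1 h2 hd ih =>
    intro h rest cl s
    have hr : '\n' ∉ c2 :: ls := by simp at h ⊢; tauto
    have hc1 : ¬ c1 = '\n' := by simp at h; tauto
    simp only [List.cons_append] at ih ⊢
    rw [stripGoA, if_neg h1, if_neg h2, if_neg hd]
    simp only [if_neg hc1]
    rw [ih hr, setAfter_add]
    simp [setAfter, scanLineB, h1, h2, hd]
  | case5 c1 =>
    intro h rest cl s
    have hc1 : ¬ c1 = '\n' := by simp at h; tauto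
    have h1 : ¬(c1 = '/' ∧ '\n' = '-') := by simp
    have h2 : ¬(c1 = '-' ∧ '\n' = '/' ∧ (0:Int) < 0) := by simp
    rw [List.cons_append, List.nil_append, stripGoA, if_neg h1, if_neg h2, if_pos rfl]
    simp only [if_neg hc1, goA_nl]
    simp [setAfter, scanLineB]
  | case6 c1 d hd =>
    intro h rest cl s
    have hc1 : ¬ c1 = '\n' := by simp at h; tauto
    have h1 : ¬(c1 = '/' ∧ '\n' = '-') := by simp
    have h2 : ¬(c1 = '-' ∧ '\n' = '/' ∧ 0 < d) := by simp
    rw [List.cons_append, List.nil_append, stripGoA, if_neg h1, if_neg h2, if_neg hd]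
    simp only [if_neg hc1, goA_nl, if_neg hd]
    simp [setAfter, scanLineB, hd]
  | case7 d =>
    intro h rest cl s
    rw [List.nil_append, goA_nl]
    simp [setAfter, scanLineB]

theorem setAfter_lt (line : List Char) (d cl : Int) (s : PySem.Set Int)
    (hlt : ∀ x ∈ s, x < cl) : ∀ x ∈ setAfter line d cl s, x < cl + 1 := by
  intro x hx
  unfold setAfter at hx
  split at hx
  · rw [PySem.Set.mem_add] at hx
    rcases hx with h | h
    · have := hlt x h; omega
    · omega
  · have := hlt x hx; omega

theorem len_setAfter (line : List Char) (d cl : Int) (s : PySem.Set Int)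
    (hlt : ∀ x ∈ s, x < cl) :
    PySem.Set.len (setAfter line d cl s) =
      PySem.Set.len s + (if (scanLineB line d).2.2 then 1 else 0) := by
  unfold setAfter
  have hns : cl ∉ s := fun hm => absurd (hlt cl hm) (by omega)
  split
  · rw [set_len_add_not_mem s cl hns]
  · simp

theorem len_add_setAfter (line : List Char) (d cl : Int) (s : PySem.Set Int)
    (hlt : ∀ x ∈ s, x < cl) :
    PySem.Set.len (PySem.Set.add (setAfter line d cl s) cl) = PySem.Set.len s + 1 := by
  unfold setAfter
  have hns : cl ∉ s := fun hm => absurd (hlt cl hm) (by omega)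
  split
  · rw [set_add_idem, set_len_add_not_mem s cl hns]
  · rw [set_len_add_not_mem s cl hns]

theorem main_lemma : ∀ (lines : List (List Char)), lines ≠ [] →
    ∀ (d cl : Int) (s : PySem.Set Int),
    (∀ l ∈ lines, '\n' ∉ l) → (∀ x ∈ s, x < cl) →
    (stripGoA (joinNL lines) d cl s).1 = (stripGoB lines d).1 ∧
    PySem.Set.len (stripGoA (joinNL lines) d cl s).2 = PySem.Set.len s + (stripGoB lines d).2 := by
  intro lines
  induction lines with
  | nil => intro h; exact absurd rfl h
  | cons line tail ih =>
    intro _ d cl s hnl hlt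
    have hl : '\n' ∉ line := hnl line (by simp)
    cases tail with
    | nil =>
      rw [joinNL]
      simp only [stripGoB]
      rw [scan_last line d hl cl s]
      refine ⟨rfl, ?_⟩
      simpa using len_setAfter line d cl s hlt
    | cons l2 rest =>
      have hnl' : ∀ l ∈ l2 :: rest, '\n' ∉ l := by
        intro l hml; exact hnl l (by simp [hml])
      rw [show joinNL (line :: l2 :: rest) = line ++ '\n' :: joinNL (l2 :: rest) from rfl,
        scan_mid line d hl (joinNL (l2 :: rest)) cl s]
      simp only [stripGoB]
      by_cases hx : (scanLineB line d).2.1 = 0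
      · rw [if_pos hx, if_pos hx, hx]
        have ih' := ih (List.cons_ne_nil l2 rest) 0 (cl + 1) (setAfter line d cl s) hnl'
          (setAfter_lt line d cl s hlt)
        refine ⟨by simp [ih'.1], ?_⟩
        simp only [ih'.2, len_setAfter line d cl s hlt]
        split <;> omega
      · rw [if_neg hx, if_neg hx]
        have ih' := ih (List.cons_ne_nil l2 rest) (scanLineB line d).2.1 (cl + 1)
          (PySem.Set.add (setAfter line d cl s) cl) hnl'
          (by
            intro x hmx
            rw [PySem.Set.mem_add] at hmx
            rcases hmx with h | h
            · have := setAfter_lt line d cl s hlt x h; omega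
            · omega)
        refine ⟨by simp [ih'.1], ?_⟩
        simp only [ih'.2, len_add_setAfter line d cl s hlt]
        omega

-- ===== VERDICT (by name: the statement is the Claim_ definition above) =====
theorem strip_block_comments_spec : Claim_equal_strip_block_comments := by
  intro source _
  unfold Spec_strip_block_comments strip_block_comments strip_block_comments_alt
  rw [splitOn_nl]
  have h := main_lemma (linesOf source.toList) (linesOf_ne_nil _) 0 0 PySem.Set.empty
    (no_nl_linesOf _) (by intro x hx; simp [PySem.Set.empty] at hx)
  rw [joinNL_linesOf] at h
  simp only [h.1, h.2]
  simp [PySem.Set.empty, PySem.Set.len]
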